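-- pv_equiv track=rewrite | github.com/Radware/Alteon-ACME-CertAutomation | renew_certificates_for_alteon_using_ACME.py | determine_subject
-- ===== SOURCE A (Python) =====
-- def determine_subject(certs_status):
--     statuses = set(certs_status.values())
--     if all("Unchanged" in status for status in statuses):
--         return "All certificates are unchanged."
--     elif all("Success" in status or "Unchanged" in status for status in statuses):
--         return "Cyber Controller successfully renewed the certificates."
--     else:
--         return "There is a failure while renewing the certificates."
-- ===== SOURCE B (Python) =====
-- _MESSAGES = ("All certificates are unchanged.",
--              "Cyber Controller successfully renewed the certificates.",
--              "There is a failure while renewing the certificates.")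
--
--
-- def _severity(status):
--     if "Unchanged" in status:
--         return 0
--     if "Success" in status:
--         return 1
--     return 2
--
--
-- def determine_subject(certs_status):
--     worst = 0
--     for status in certs_status.values():
--         worst = max(worst, _severity(status))
--     return _MESSAGES[worst]
-- ===== Notes on version B (the rewrite author's own statement) =====
-- stated objective: alternative
-- what changed: Replaces the set construction and the two all()-substring scans by a map/reduce: each status is classified into a numeric severity (0 unchanged, 1 success, 2 failure), the maximum severity is folded over the values, and the answer is looked up in a message table instead of an if/elif chain.
import Mathlib
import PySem

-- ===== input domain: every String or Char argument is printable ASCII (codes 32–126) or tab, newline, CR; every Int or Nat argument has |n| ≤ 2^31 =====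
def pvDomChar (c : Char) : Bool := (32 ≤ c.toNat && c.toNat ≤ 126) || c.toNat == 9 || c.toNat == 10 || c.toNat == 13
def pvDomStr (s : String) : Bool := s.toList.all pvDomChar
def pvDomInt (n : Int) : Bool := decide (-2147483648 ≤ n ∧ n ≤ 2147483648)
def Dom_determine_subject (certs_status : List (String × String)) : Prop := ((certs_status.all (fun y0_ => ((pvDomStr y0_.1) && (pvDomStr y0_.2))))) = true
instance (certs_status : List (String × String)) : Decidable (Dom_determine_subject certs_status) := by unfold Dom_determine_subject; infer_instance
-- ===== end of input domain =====

-- B replaces A's set + two all() substring scans by a map/reduce: per-status numeric severity,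
-- a max fold, and a message-table lookup (alternative decomposition; return value only).
-- ===== PORT A =====
def determine_subject (certs_status : List (String × String)) : String :=
  let statuses : PySem.Set String := PySem.Set.ofList (certs_status.map Prod.snd)
  if statuses.all (fun status => PySem.Str.isIn "Unchanged" status) then
    "All certificates are unchanged."
  else if statuses.all (fun status => PySem.Str.isIn "Success" status || PySem.Str.isIn "Unchanged" status) then
    "Cyber Controller successfully renewed the certificates."
  else
    "There is a failure while renewing the certificates."

-- ===== PORT B =====
def pvMessagesB : List String :=
  ["All certificates are unchanged.",
   "Cyber Controller successfully renewed the certificates.",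
   "There is a failure while renewing the certificates."]

def pvSeverityB (status : String) : Int :=
  if PySem.Str.isIn "Unchanged" status then 0
  else if PySem.Str.isIn "Success" status then 1
  else 2

def determine_subject_alt (certs_status : List (String × String)) : String :=
  let worst : Int := certs_status.foldl (fun w kv => max w (pvSeverityB kv.2)) 0
  (PySem.List.pyGet? pvMessagesB worst).get!

-- ===== PRECONDITION & SPEC =====
def Spec_determine_subject (certs_status : List (String × String)) (out : String) : Prop := out = determine_subject_alt certs_status
instance (certs_status : List (String × String)) (out : String) : Decidable (Spec_determine_subject certs_status out) := by unfold Spec_determine_subject; infer_instance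

-- ===== CLAIM (what is proved, stated in full; the proofs are below) =====
def Claim_equal_determine_subject : Prop := ∀ (certs_status : List (String × String)), Dom_determine_subject certs_status → Spec_determine_subject certs_status (determine_subject certs_status)

-- ===== LEMMAS AND PROOFS =====

-- the branch index A's if/elif chain selects, as a value
def pvFval (l : List (String × String)) : Int :=
  if l.all (fun kv => PySem.Str.isIn "Unchanged" kv.2) then 0
  else if l.all (fun kv => PySem.Str.isIn "Success" kv.2 || PySem.Str.isIn "Unchanged" kv.2) then 1
  else 2

theorem pvFval_nonneg (l : List (String × String)) : 0 ≤ pvFval l := by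
  unfold pvFval; split_ifs <;> norm_num

theorem pvSev_step (hd : String × String) (tl : List (String × String)) :
    max (pvSeverityB hd.2) (pvFval tl) = pvFval (hd :: tl) := by
  have h34 : tl.all (fun kv => PySem.Str.isIn "Unchanged" kv.2) = true →
      tl.all (fun kv => PySem.Str.isIn "Success" kv.2 || PySem.Str.isIn "Unchanged" kv.2) = true := by
    intro h; rw [List.all_eq_true] at h ⊢; intro kv hk
    simp only [Bool.or_eq_true]
    exact Or.inr (h kv hk)
  unfold pvSeverityB pvFval
  simp only [List.all_cons, Bool.and_eq_true]
  cases h1 : PySem.Str.isIn "Unchanged" hd.2 <;>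
    cases h2 : PySem.Str.isIn "Success" hd.2 <;>
      cases h3 : tl.all (fun kv => PySem.Str.isIn "Unchanged" kv.2) <;>
        cases h4 : tl.all (fun kv => PySem.Str.isIn "Success" kv.2 || PySem.Str.isIn "Unchanged" kv.2) <;>
          simp_all <;>
            first
            | omega
            | decide
            | (obtain ⟨a, b, hm, hs, hu⟩ := h4
               rcases h34 h3 a b hm with h | h <;> simp_all)

theorem pvFold_eq (l : List (String × String)) (a : Int) (ha : 0 ≤ a) :
    l.foldl (fun w kv => max w (pvSeverityB kv.2)) a = max a (pvFval l) := by
  induction l generalizing a with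
  | nil => simp [pvFval]; omega
  | cons hd tl ih =>
    simp only [List.foldl_cons]
    rw [ih (max a (pvSeverityB hd.2)) (le_trans ha (le_max_left _ _)), ← pvSev_step]
    omega

theorem all_ofList_pv {α : Type} [BEq α] [LawfulBEq α] (xs : List α) (p : α → Bool) :
    (PySem.Set.ofList xs).all p = xs.all p := by
  rw [Bool.eq_iff_iff]
  simp [List.all_eq_true, PySem.Set.mem_ofList]

-- ===== VERDICT (by name: the statement is the Claim_ definition above) =====
theorem determine_subject_spec : Claim_equal_determine_subject := by
  intro cs _
  show determine_subject cs = determine_subject_alt cs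
  simp only [determine_subject, determine_subject_alt, all_ofList_pv, List.all_map,
    Function.comp_def, pvFold_eq cs 0 le_rfl, max_eq_right (pvFval_nonneg cs)]
  unfold pvFval
  split_ifs <;> rfl
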